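-- pv_equiv track=rewrite | github.com/links-ads/igarss-fmars-gen | src/maxarseg/main_seg_event_w_config_partitioned.py | balance_groups
-- ===== SOURCE A (Python) =====
-- def balance_groups(nums, k):
--     # Sort numbers in descending order
--     nums.sort(reverse=True)
--
--     # Initialize k groups
--     groups = [[] for _ in range(k)]
--     sums = [0] * k
--
--     # Distribute numbers into groups
--     for num in nums:
--         # Find the group with the smallest sum and add the number to it
--         idx = sums.index(min(sums))
--         groups[idx].append(num)
--         sums[idx] += num
--
--     return groups
-- ===== SOURCE B (Python) =====
-- def balance_groups(nums, k):
--     # Sort numbers in descending order (in place, like A)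
--     nums.sort(reverse=True)
--
--     buckets = [[] for _ in range(k)]
--     # Pool of (current sum, group index) pairs, kept sorted ascending;
--     # the head is always the least-loaded group (lowest index on ties).
--     pool = [(0, i) for i in range(k)]
--
--     for num in nums:
--         s, i = pool.pop(0)
--         buckets[i].append(num)
--         item = (s + num, i)
--         j = 0
--         while j < len(pool) and pool[j] <= item:
--             j += 1
--         pool.insert(j, item)
--
--     return buckets
-- ===== Notes on version B (the rewrite author's own statement) =====
-- stated objective: alternative
-- what changed: instead of rescanning a sums array with min()+index() for every number, B keeps a pool of (sum, group-index) pairs sorted ascending, pops the head (the least-loaded group, lowest index on ties) and re-inserts the updated pair in order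
import Mathlib
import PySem

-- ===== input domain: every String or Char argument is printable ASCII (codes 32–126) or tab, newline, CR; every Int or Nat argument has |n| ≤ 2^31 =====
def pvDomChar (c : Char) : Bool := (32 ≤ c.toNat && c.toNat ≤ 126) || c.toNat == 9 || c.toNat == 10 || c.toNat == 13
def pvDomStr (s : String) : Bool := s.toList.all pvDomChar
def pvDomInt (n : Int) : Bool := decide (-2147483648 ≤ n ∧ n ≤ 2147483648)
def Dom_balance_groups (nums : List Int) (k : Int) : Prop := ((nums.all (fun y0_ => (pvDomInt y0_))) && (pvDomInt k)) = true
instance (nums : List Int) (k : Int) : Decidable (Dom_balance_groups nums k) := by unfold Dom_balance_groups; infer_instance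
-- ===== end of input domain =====

-- B replaces A's per-number min()+index() scans over a sums array by a pool of (sum, group-index)
-- pairs kept sorted ascending: pop the head, re-insert the updated pair in order (objective: alternative).
-- Both Pythons sort `nums` in place (same mutation); the equivalence proved is about the return value.

-- ===== PORT A =====
def pvStepA (st : List (List Int) × List Int) (num : Int) : List (List Int) × List Int :=
  match PySem.List.min? st.2 (fun x => x) with
  | none => st            -- Python: min([]) raises ValueError (excluded by Pre_)
  | some m =>
    match PySem.List.index? st.2 m with
    | none => st          -- unreachable: m ∈ st.2
    | some idx =>
      (st.1.set idx ((st.1.getD idx []) ++ [num]), st.2.set idx ((st.2.getD idx 0) + num))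

def balance_groups (nums : List Int) (k : Int) : List (List Int) :=
  let sortedNums := PySem.List.sorted nums (fun x => x) true
  let groups : List (List Int) := (PySem.List.pyRange 0 k 1).map (fun _ => [])
  let sums : List Int := PySem.List.pyRepeat [0] k
  (sortedNums.foldl pvStepA (groups, sums)).1

-- ===== PORT B =====
def pvPairLe (p q : Int × Int) : Bool := decide (p.1 < q.1 ∨ (p.1 = q.1 ∧ p.2 ≤ q.2))

-- B's hand-written ordered insert: skip while pool[j] <= item, insert there
def pvInsertSorted (item : Int × Int) : List (Int × Int) → List (Int × Int)
  | [] => [item]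
  | q :: rest => if pvPairLe q item then q :: pvInsertSorted item rest else item :: q :: rest

def pvStepB (st : List (List Int) × List (Int × Int)) (num : Int) : List (List Int) × List (Int × Int) :=
  match st.2 with
  | [] => st              -- Python: pool.pop(0) raises IndexError (excluded by Pre_)
  | (s, i) :: rest =>
      (st.1.set i.toNat ((st.1.getD i.toNat []) ++ [num]), pvInsertSorted (s + num, i) rest)

def balance_groups_alt (nums : List Int) (k : Int) : List (List Int) :=
  let sortedNums := PySem.List.sorted nums (fun x => x) true
  let buckets : List (List Int) := (PySem.List.pyRange 0 k 1).map (fun _ => [])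
  let pool : List (Int × Int) := (PySem.List.pyRange 0 k 1).map (fun i => (0, i))
  (sortedNums.foldl pvStepB (buckets, pool)).1

-- ===== PRECONDITION & SPEC =====
-- Pre_ excludes exactly the inputs where A raises: k ≤ 0 with nums nonempty
-- (min() of the empty sums list is a ValueError; B's pool.pop(0) raises there too).
def Pre_balance_groups (nums : List Int) (k : Int) : Prop := 0 < k ∨ nums = []
instance (nums : List Int) (k : Int) : Decidable (Pre_balance_groups nums k) := by
  unfold Pre_balance_groups; infer_instance
def pvWitness_balance_groups : List Int × Int := ([3, 1, 2], 2)

def Spec_balance_groups (nums : List Int) (k : Int) (out : List (List Int)) : Prop := out = balance_groups_alt nums k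
instance (nums : List Int) (k : Int) (out : List (List Int)) : Decidable (Spec_balance_groups nums k out) := by unfold Spec_balance_groups; infer_instance

-- ===== CLAIM (what is proved, stated in full; the proofs are below) =====
def Claim_equal_balance_groups : Prop := ∀ (nums : List Int) (k : Int), Dom_balance_groups nums k → Pre_balance_groups nums k → Spec_balance_groups nums k (balance_groups nums k)

-- ===== LEMMAS AND PROOFS =====

-- (sums[m], offset+m) pairs, as B's pool describes A's sums array
def pvEnum (off : Int) : List Int → List (Int × Int)
  | [] => []
  | s :: rest => (s, off) :: pvEnum (off + 1) rest

lemma pvPairLe_total (p q : Int × Int) : pvPairLe p q = true ∨ pvPairLe q p = true := by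
  simp [pvPairLe]; omega

lemma pvPairLe_trans {p q r : Int × Int} (h1 : pvPairLe p q = true) (h2 : pvPairLe q r = true) :
    pvPairLe p r = true := by
  simp [pvPairLe] at *; omega

lemma pvInsertSorted_perm (item : Int × Int) (l : List (Int × Int)) :
    (pvInsertSorted item l).Perm (item :: l) := by
  induction l with
  | nil => simp [pvInsertSorted]
  | cons q rest ih =>
    simp only [pvInsertSorted]
    split
    · exact (ih.cons q).trans (List.Perm.swap _ _ _)
    · exact List.Perm.refl _

lemma pvInsertSorted_pairwise (item : Int × Int) (l : List (Int × Int))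
    (h : l.Pairwise (fun p q => pvPairLe p q = true)) :
    (pvInsertSorted item l).Pairwise (fun p q => pvPairLe p q = true) := by
  induction l with
  | nil => simp [pvInsertSorted]
  | cons q rest ih =>
    rcases List.pairwise_cons.mp h with ⟨hq, hrest⟩
    simp only [pvInsertSorted]
    split
    · rename_i hqi
      refine List.pairwise_cons.mpr ⟨?_, ih hrest⟩
      intro a ha
      have := (pvInsertSorted_perm item rest).mem_iff.mp ha
      rcases List.mem_cons.mp this with rfl | hm
      · exact hqi
      · exact hq a hm
    · rename_i hqi
      have hiq : pvPairLe item q = true := by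
        rcases pvPairLe_total q item with h' | h'
        · exact absurd h' hqi
        · exact h'
      refine List.pairwise_cons.mpr ⟨?_, h⟩
      intro a ha
      rcases List.mem_cons.mp ha with rfl | hm
      · exact hiq
      · exact pvPairLe_trans hiq (hq a hm)

lemma pvEnum_length (off : Int) (l : List Int) : (pvEnum off l).length = l.length := by
  induction l generalizing off with
  | nil => rfl
  | cons s rest ih => simp [pvEnum, ih]

lemma pvMem_enum {off : Int} {l : List Int} {p : Int × Int} :
    p ∈ pvEnum off l ↔ ∃ m : Nat, ∃ h : m < l.length, p.2 = off + m ∧ p.1 = l[m] := by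
  induction l generalizing off with
  | nil => simp [pvEnum]
  | cons s rest ih =>
    simp only [pvEnum, List.mem_cons, ih]
    constructor
    · rintro (rfl | ⟨m, hm, h2, h1⟩)
      · exact ⟨0, by simp, by simp⟩
      · exact ⟨m + 1, by simpa using hm, by push_cast; omega, by simpa using h1⟩
    · rintro ⟨m, hm, h2, h1⟩
      cases m with
      | zero =>
        left
        simp at h1 h2
        exact Prod.ext h1 h2
      | succ m =>
        right
        exact ⟨m, by simpa using hm, by push_cast at h2 ⊢; omega, by simpa using h1⟩

lemma pvEnum_set (off : Int) (l : List Int) (m : Nat) (v : Int) :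
    pvEnum off (l.set m v) = (pvEnum off l).set m (v, off + m) := by
  induction l generalizing off m with
  | nil => simp [pvEnum]
  | cons s rest ih =>
    cases m with
    | zero => simp [pvEnum]
    | succ m =>
      simp only [List.set_cons_succ, pvEnum, ih]
      congr 2
      simp only [Prod.mk.injEq, true_and]
      push_cast
      omega

lemma pvEnum_nodup (off : Int) (l : List Int) : (pvEnum off l).Nodup := by
  induction l generalizing off with
  | nil => simp [pvEnum]
  | cons s rest ih =>
    refine List.nodup_cons.mpr ⟨?_, ih (off + 1)⟩
    intro hmem
    rcases pvMem_enum.mp hmem with ⟨m, hm, h2, _⟩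
    simp at h2
    omega

lemma pvEnum_getElem (off : Int) (l : List Int) (m : Nat) (h : m < l.length) :
    (pvEnum off l)[m]'(by rw [pvEnum_length]; exact h) = (l[m], off + m) := by
  induction l generalizing off m with
  | nil => simp at h
  | cons a t ih =>
    cases m with
    | zero => simp [pvEnum]
    | succ m =>
      have hm : m < t.length := by simpa using h
      simp only [pvEnum, List.getElem_cons_succ, ih (off + 1) m hm, Prod.mk.injEq, true_and]
      push_cast
      omega

lemma pvEnum_replicate (off : Int) (n : Nat) (c : Int) :
    pvEnum off (List.replicate n c) = (List.range n).map (fun (m : Nat) => (c, off + (m : Int))) := by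
  apply List.ext_getElem
  · simp [pvEnum_length]
  · intro j h1 h2
    have hj : j < n := by simpa [pvEnum_length] using h1
    rw [pvEnum_getElem off _ j (by simpa using hj)]
    simp

-- first index of the min value in sums = index of the lexicographic min of the enum pairs
lemma pv_index_of_first (sums : List Int) (s : Int) (m : Nat) (hm : m < sums.length)
    (hv : sums[m] = s) (hfirst : ∀ j (_ : j < sums.length), j < m → sums[j] ≠ s) :
    PySem.List.index? sums s = some m := by
  rw [PySem.List.index?_eq_some_iff]
  refine ⟨sums.take m, sums.drop (m + 1), ?_, by simp [hm.le], ?_⟩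
  · conv_lhs => rw [← List.take_append_drop m sums]
    rw [List.drop_eq_getElem_cons hm, hv]
  · intro hmem
    rcases List.mem_take_iff_getElem.mp hmem with ⟨j, hj, hjv⟩
    have hjm : j < m := lt_of_lt_of_le hj (by simp)
    exact hfirst j (by omega) hjm (by simpa using hjv)

-- the central induction: A's (groups, sums) loop and B's (buckets, pool) loop stay aligned
lemma pv_loop_eq (ns : List Int) : ∀ (g : List (List Int)) (sums : List Int)
    (pool : List (Int × Int)), sums ≠ [] →
    pool.Pairwise (fun p q => pvPairLe p q = true) →
    pool.Perm (pvEnum 0 sums) →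
    (ns.foldl pvStepA (g, sums)).1 = (ns.foldl pvStepB (g, pool)).1 := by
  induction ns with
  | nil => intro g sums pool _ _ _; rfl
  | cons num ns ih =>
    intro g sums pool hne hsorted hperm
    -- pool is nonempty
    have hplen : pool.length = sums.length := by
      rw [hperm.length_eq, pvEnum_length]
    obtain ⟨⟨s, i⟩, rest, rfl⟩ : ∃ p rest, pool = p :: rest := by
      cases pool with
      | nil => exact absurd (by simpa using hplen.symm) (by simpa using hne)
      | cons p rest => exact ⟨p, rest, rfl⟩
    -- the head is an enum pair: s = sums[m], i = m
    have hmem : (s, i) ∈ pvEnum 0 sums := hperm.mem_iff.mp (by simp)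
    rcases pvMem_enum.mp hmem with ⟨m, hmlt, hi, hs⟩
    simp only at hi hs
    have hi0 : i = (m : Int) := by omega
    -- head is pvPairLe-below every pool element
    have hhead : ∀ q ∈ pvEnum 0 sums, pvPairLe (s, i) q = true := by
      intro q hq
      rcases hperm.symm.mem_iff.mp hq with hq'
      rcases List.mem_cons.mp hq' with rfl | hq''
      · simp [pvPairLe]
      · exact (List.pairwise_cons.mp hsorted).1 q hq''
    -- s is the min of sums
    have hsmem : s ∈ sums := by rw [hs]; exact List.getElem_mem hmlt
    have hsmin : ∀ y ∈ sums, s ≤ y := by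
      intro y hy
      rcases List.mem_iff_getElem.mp hy with ⟨j, hj, rfl⟩
      have := hhead (sums[j], (j : Int)) (pvMem_enum.mpr ⟨j, hj, by simp, rfl⟩)
      simp [pvPairLe] at this
      omega
    have hminEq : PySem.List.min? sums (fun x => x) = some s := by
      cases hmq : PySem.List.min? sums (fun x => x) with
      | none => exact absurd ((PySem.List.min?_eq_none_iff sums _).mp hmq) hne
      | some m' =>
        have h1 : s ≤ m' := hsmin m' (PySem.List.min?_mem hmq)
        have h2 : m' ≤ s := PySem.List.min?_isMin hmq s hsmem
        rw [le_antisymm h2 h1]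
    -- m is the FIRST index with sums[j] = s
    have hidxEq : PySem.List.index? sums s = some m := by
      refine pv_index_of_first sums s m hmlt hs.symm ?_
      intro j hj hjm heq
      have := hhead (sums[j], (j : Int)) (pvMem_enum.mpr ⟨j, hj, by simp, rfl⟩)
      simp [pvPairLe, hi0, heq, hs] at this
      omega
    -- unfold one step of each loop
    have hidx' : List.idxOf? s sums = some m := by
      rw [← PySem.List.index?_eq_idxOf?]
      exact hidxEq
    have hA : pvStepA (g, sums) num
        = (g.set m ((g.getD m []) ++ [num]), sums.set m ((sums.getD m 0) + num)) := by
      simp [pvStepA, hminEq, hidx']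
    have hB : pvStepB (g, (s, i) :: rest) num
        = (g.set m ((g.getD m []) ++ [num]), pvInsertSorted (s + num, i) rest) := by
      simp [pvStepB, hi0]
    rw [List.foldl_cons, List.foldl_cons, hA, hB]
    -- re-establish the invariant for the new state
    have hgd : sums.getD m 0 = s := by
      rw [List.getD_eq_getElem _ _ hmlt, hs]
    rw [hgd]
    apply ih
    · intro hcon
      have : sums.length = 0 := by
        have := congrArg List.length hcon
        simpa using this
      omega
    · exact pvInsertSorted_pairwise _ _ (List.pairwise_cons.mp hsorted).2
    · -- perm: pvInsertSorted (s+num, i) rest ~ pvEnum 0 (sums.set m (s+num))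
      have hlt : m < (pvEnum 0 sums).length := by rw [pvEnum_length]; exact hmlt
      have hget : (pvEnum 0 sums)[m] = (s, i) := by
        rw [pvEnum_getElem 0 sums m hmlt, ← hs, hi0]
        simp
      have hset : pvEnum 0 (sums.set m (s + num)) = (pvEnum 0 sums).set m (s + num, i) := by
        rw [pvEnum_set]
        congr 2
        omega
      refine (pvInsertSorted_perm _ _).trans ?_
      rw [hset]
      refine List.Perm.trans ?_ (List.set_perm_cons_eraseIdx hlt (s + num, i)).symm
      refine List.Perm.cons _ ?_
      have h1 : rest.Perm ((pvEnum 0 sums).erase (s, i)) := by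
        have := hperm.erase (s, i)
        simpa [List.erase_cons_head] using this
      have h2 : (pvEnum 0 sums).erase (s, i) = (pvEnum 0 sums).eraseIdx m := by
        rw [← hget]
        exact List.Nodup.erase_getElem (pvEnum_nodup 0 sums) m hlt
      rw [← h2]
      exact h1

-- ===== VERDICT (by name: the statement is the Claim_ definition above) =====
theorem balance_groups_spec : Claim_equal_balance_groups := by
  intro nums k _ hpre
  unfold Spec_balance_groups balance_groups balance_groups_alt
  by_cases hn : nums = []
  · have hnil : PySem.List.sorted nums (fun x => x) true = [] :=
      (PySem.List.sorted_eq_nil_iff nums _ true).mpr hn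
    simp [hnil]
  · have hk : 0 < k := hpre.resolve_right hn
    have hkn : 0 < k.toNat := by omega
    simp only [PySem.List.pyRepeat_singleton]
    apply Eq.symm
    refine Eq.symm (pv_loop_eq _ _ _ _ ?_ ?_ ?_)
    · simp only [ne_eq, ← List.length_eq_zero_iff, List.length_replicate]
      omega
    · rw [PySem.List.pyRange_one]
      rw [List.pairwise_map, List.pairwise_map]
      exact List.Pairwise.imp (fun hab => by simp [pvPairLe]; omega) List.pairwise_lt_range
    · rw [pvEnum_replicate, PySem.List.pyRange_one]
      apply List.Perm.of_eq
      simp [List.map_map, Function.comp_def]
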